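/- GENERATED by mk_final_copies.py from the proof of the farm's unit `compute_sorted_huffman.1` (farm:compute_sorted_huffman.1.1: Lemmas.lean) as the
   re-elaboration sweep compiled it — do not edit. -/
/-
  LEMMAS OF THE UNIT compute_sorted_huffman.1 that do not walk code: the frame argument at the exit (what the stores into
  `sorted_codewords` and into the own stack frame keep), the accessors as the walker's loads, the counting step of CNT′.
-/
import Asan.CheckWalk
import Vorbis.Spec.Units.compute_sorted_huffman_1

open X86 X86.User Asan Vorbis Vorbis.Spec

set_option maxRecDepth 4000
set_option maxHeartbeats 4000000

namespace Vorbis.Spec.compute_sorted_huffman_1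

/-- A block off the stack window and off the `sorted_codewords` window is kept by a memory that changed only inside the two. -/
theorem kept_of_same {m m' : Mem} {sp SC n : Nat} {B : Block}
    (hsame : Mem.SameExcept [⟨sp - 336, sp⟩, ⟨SC, SC + n⟩] m m')
    (h1 : B.base + B.size ≤ sp - 336 ∨ sp ≤ B.base)
    (h2 : B.base + B.size ≤ SC ∨ SC + n ≤ B.base)
    (hB : B.base + B.size ≤ 2 ^ 64) : B.Kept m m' := by
  refine Block.Kept.of_sameExcept hsame ?_ hB
  intro w hw
  rcases List.mem_cons.mp hw with rfl | hw'
  · exact h1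
  · have e : w = ⟨SC, SC + n⟩ := List.mem_singleton.mp hw'
    subst e
    exact h2

/-- Where an allocated block is relative to the own stack window `[rsp − 336, rsp)`, from `blk_where`. -/
theorem off_stack {a b sp : Nat} (hroom : 7340032 + 336 ≤ sp) (htop : sp + 8 ≤ 8388608)
    (h : sp + 8 ≤ a ∨ b ≤ 7340032 ∨ 8388608 ≤ a) : b ≤ sp - 336 ∨ sp ≤ a := by
  omega

/-- What the stores of this segment (all into `sorted_codewords[0 .. se)`) must not meet: the struct, the `sorted_values`
block, the `lengths` array and, for a sparse book, the `values` array. From the precondition's `Apart` lists. -/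
structure ScApart (u : State) : Prop where
  book : (Codebook.block (u.reg .rdi).toNat).disjoint (scBlock u.mem (u.reg .rdi).toNat)
  sv : (scBlock u.mem (u.reg .rdi).toNat).disjoint (Codebook.svBlock u.mem (u.reg .rdi).toNat)
  lens : (Block.mk (u.reg .rsi).toNat (Codebook.entries u.mem (u.reg .rdi).toNat).toNat).disjoint
    (scBlock u.mem (u.reg .rdi).toNat)
  vals : Codebook.sparse u.mem (u.reg .rdi).toNat ≠ 0 → (scBlock u.mem (u.reg .rdi).toNat).disjoint
    ⟨(u.reg .rdx).toNat, 4 * (Codebook.sorted_entries u.mem (u.reg .rdi).toNat).toNat⟩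

/-- `ScApart` from the precondition. -/
theorem scApart_of_pre {others : List Obj} {frames : List (Nat × FrameLayout)} {Blk : Block → Prop} {u : State}
    (hpre : SortedHuffmanPre others frames Blk u) : ScApart u := by
  by_cases hs : Codebook.sparse u.mem (u.reg .rdi).toNat = 0
  · have h := hpre.apartDense hs
    simp only [Apart, List.pairwise_cons, List.mem_cons, List.not_mem_nil, or_false, forall_eq_or_imp, forall_eq,
      List.Pairwise.nil, and_true, false_imp_iff, implies_true] at h
    obtain ⟨⟨_, _, hb, _⟩, ⟨_, hl, _⟩, _, hv⟩ := h
    refine ⟨hb, hv, ?_, fun hne => absurd hs hne⟩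
    have e := (hpre.dense hs).1
    unfold Codebook.clBlock at hl
    rw [Codebook.N_dense hs, ← e] at hl
    exact hl
  · have h := hpre.apartSparse hs
    simp only [Apart, List.pairwise_cons, List.mem_cons, List.not_mem_nil, or_false, forall_eq_or_imp, forall_eq,
      List.Pairwise.nil, and_true, false_imp_iff, implies_true] at h
    obtain ⟨⟨_, _, hb, _⟩, _, _, ⟨hv, hl, hx⟩, _⟩ := h
    exact ⟨hb, hv, hl.symm, fun _ => hx⟩


/-- **The exit assertion's `Common`** from what the two loops keep: the memory changed only inside the own stack frame and inside
`sorted_codewords[0 .. se]`; the frame facts; rbp and the two spilled arguments. -/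
theorem common_exit {others : List Obj} {frames : List (Nat × FrameLayout)} {Blk : Block → Prop} {u₀ : State} {ret : Word}
    {u v : State}
    (he : AtEntry (conv u₀) L.compute_sorted_huffman.entry (compute_sorted_huffman.spec others frames Blk).frame ret u)
    (hpre : SortedHuffmanPre others frames Blk u)
    (hroom : 7340032 + 336 ≤ (u.reg .rsp).toNat)
    (hsame : Mem.SameExcept [⟨(u.reg .rsp).toNat - 336, (u.reg .rsp).toNat⟩,
      ⟨Codebook.sorted_codewords u.mem (u.reg .rdi).toNat, Codebook.sorted_codewords u.mem (u.reg .rdi).toNat +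
        4 * ((Codebook.sorted_entries u.mem (u.reg .rdi).toNat).toNat + 1)⟩] u.mem v.mem)
    (hrsp : v.reg .rsp = u.reg .rsp - 104)
    (ra : UInt64.ofNat (v.mem.readLE (u.reg .rsp) 8) = ret)
    (r15 : UInt64.ofNat (v.mem.readLE (u.reg .rsp - 8) 8) = u.reg .r15)
    (r14 : UInt64.ofNat (v.mem.readLE (u.reg .rsp - 16) 8) = u.reg .r14)
    (r13 : UInt64.ofNat (v.mem.readLE (u.reg .rsp - 24) 8) = u.reg .r13)
    (r12 : UInt64.ofNat (v.mem.readLE (u.reg .rsp - 32) 8) = u.reg .r12)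
    (rbp : UInt64.ofNat (v.mem.readLE (u.reg .rsp - 40) 8) = u.reg .rbp)
    (rbx : UInt64.ofNat (v.mem.readLE (u.reg .rsp - 48) 8) = u.reg .rbx)
    (code : CodeOK u₀ v.mem) (inv : abiInv v) (hun : ShadowUntouched u.mem v.mem)
    (hc : v.reg .rbp = u.reg .rdi)
    (hlen : UInt64.ofNat (v.mem.readLE (u.reg .rsp - 88) 8) = u.reg .rsi)
    (hval : UInt64.ofNat (v.mem.readLE (u.reg .rsp - 72) 8) = u.reg .rdx) :
    SortedHuffman.Common others frames Blk u₀ ret u v := by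
  have hsh := hpre.shadow
  have hsp := hsh.rsp
  have hap := scApart_of_pre hpre
  have htop : 7340032 < (u.reg .rsp).toNat + 8 := by omega
  have hse := hpre.se_pos
  have hse2 := hpre.K2.se_le
  -- the struct is kept
  have hbook := hpre.bookLive.where_ hsh.inv hsh.offText (by decide)
  have kbook : (Codebook.block (u.reg .rdi).toNat).Kept u.mem v.mem := by
    refine kept_of_same hsame (off_stack hroom hsp.2.1 hbook.2.2) ?_ ?_
    · exact hap.book
    · simp only [Vorbis.Off.sizeof.Codebook] at hbook ⊢
      omega
  have hf : Codebook.SameFields u.mem v.mem (u.reg .rdi).toNat := Codebook.SameFields.of_kept kbook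
  -- the `sorted_values` block is kept
  have wsv : L.textHi ≤ Codebook.sorted_values u.mem (u.reg .rdi).toNat - 4 ∧
      Codebook.sorted_values u.mem (u.reg .rdi).toNat - 4 +
        4 * ((Codebook.sorted_entries u.mem (u.reg .rdi).toNat).toNat + 1) ≤ 12582912 ∧
      ((u.reg .rsp).toNat + 8 ≤ Codebook.sorted_values u.mem (u.reg .rdi).toNat - 4 ∨
        Codebook.sorted_values u.mem (u.reg .rdi).toNat - 4 +
          4 * ((Codebook.sorted_entries u.mem (u.reg .rdi).toNat).toNat + 1) ≤ 7340032 ∨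
        8388608 ≤ Codebook.sorted_values u.mem (u.reg .rdi).toNat - 4) :=
    blk_where hpre.live hsh.inv hsh.offText htop (hpre.K4.sv hse) (by simp only []; omega)
  have ksv : (Codebook.svBlock u.mem (u.reg .rdi).toNat).Kept u.mem v.mem := by
    refine kept_of_same hsame (off_stack hroom hsp.2.1 wsv.2.2) hap.sv.symm ?_
    have := wsv.2.1
    simp only []
    omega
  -- the `lengths` array is kept
  have hepos : 1 ≤ (Codebook.entries u.mem (u.reg .rdi).toNat).toNat := by omega
  have wl : L.textHi ≤ (u.reg .rsi).toNat ∧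
      (u.reg .rsi).toNat + (Codebook.entries u.mem (u.reg .rdi).toNat).toNat ≤ 12582912 ∧
      ((u.reg .rsp).toNat + 8 ≤ (u.reg .rsi).toNat ∨
        (u.reg .rsi).toNat + (Codebook.entries u.mem (u.reg .rdi).toNat).toNat ≤ 7340032 ∨
        8388608 ≤ (u.reg .rsi).toNat) :=
    blk_where hpre.live hsh.inv hsh.offText htop hpre.lens hepos
  have klen : (Block.mk (u.reg .rsi).toNat (Codebook.entries u.mem (u.reg .rdi).toNat).toNat).Kept u.mem v.mem := by
    refine kept_of_same hsame (off_stack hroom hsp.2.1 wl.2.2) hap.lens ?_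
    have := wl.2.1
    simp only []
    omega
  have hsv4 : 4 ≤ Codebook.sorted_values u.mem (u.reg .rdi).toNat := by
    have := wsv.1
    have e : L.textHi = 0x119d40 := rfl
    omega
  refine ⟨⟨he, hrsp, ra, r15, r14, r13, r12, rbp, rbx, ?same, code, inv, hun⟩, hpre, hc, hlen, hval, hf,
    hpre.K1.frame hf, hpre.K2.frame hf, ?k3, ?k4, ?zv, ?vals, klen⟩
  case same =>
    simp only [X86.User.Spec.footprint, vspec]
    refine hsame.mono ?_
    intro w hw a h1 h2
    rcases List.mem_cons.mp hw with rfl | hw'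
    · exact ⟨_, List.mem_cons_self, h1, h2⟩
    · have e := List.mem_singleton.mp hw'
      subst e
      refine ⟨(scBlock u.mem (u.reg .rdi).toNat).span, List.mem_cons_of_mem _ ?_, h1, h2⟩
      unfold compute_sorted_huffman.wins
      exact List.mem_append_left _ List.mem_cons_self
  case k3 =>
    have k := hpre.K3t
    refine ⟨?_, ?_, ?_⟩
    · intro hs
      rw [hf.sparse] at hs
      have kd := k.dense hs
      refine ⟨?_, ?_⟩
      · rw [hf.codeword_lengths, hf.entries]
        exact kd.lengths
      · rw [hf.codewords, hf.entries]
        exact kd.codewords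
    · intro hs
      rw [hf.sparse] at hs
      rw [hf.codeword_lengths, hf.sorted_entries]
      exact k.sparse_lengths hs
    · intro hs
      rw [hf.sparse] at hs
      rw [hf.codewords, hf.sorted_entries]
      exact k.sparse_codewords hs
  case k4 =>
    refine hpre.K4.frame hf ?_
    intro _
    exact ksv.i32 _ (by simp only []; omega) (by simp only []; omega)
  case zv =>
    refine hpre.zv.same ?_ ?_
    · refine Mem.EqOn.mono ksv.same ?_ ?_
      · simp only []
        omega
      · simp only []
        omega
    · have := ksv.inside
      simp only [] at this
      omega
  case vals =>
    intro hs
    obtain ⟨hb, hv⟩ := hpre.sparse hs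
    have wv : L.textHi ≤ (u.reg .rdx).toNat ∧
        (u.reg .rdx).toNat + 4 * (Codebook.sorted_entries u.mem (u.reg .rdi).toNat).toNat ≤ 12582912 ∧
        ((u.reg .rsp).toNat + 8 ≤ (u.reg .rdx).toNat ∨
          (u.reg .rdx).toNat + 4 * (Codebook.sorted_entries u.mem (u.reg .rdi).toNat).toNat ≤ 7340032 ∨
          8388608 ≤ (u.reg .rdx).toNat) :=
      blk_where hpre.live hsh.inv hsh.offText htop hb (by simp only []; omega)
    have kv : (Block.mk (u.reg .rdx).toNat (4 * (Codebook.sorted_entries u.mem (u.reg .rdi).toNat).toNat)).Kept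
        u.mem v.mem := by
      refine kept_of_same hsame (off_stack hroom hsp.2.1 wv.2.2) (hap.vals hs).symm ?_
      have := wv.2.1
      simp only []
      omega
    exact hv.same kv.same kv.inside

/-- **The precondition as numbers** (what the walks of the two loops use): the fields of `*c` the code loads, as ghost numbers
`E` (entries), `SE` (sorted_entries), `CW`, `SC` (the two pointers), `SPb` (the sparse byte), `NN` = N(c); where the blocks
`sorted_codewords`, `lengths`, `codewords` are (above the text, in the data space, off the own stack frame), that they are live,
that `sorted_codewords` meets neither the struct nor `lengths`, and CNT′. -/
structure Nums (others : List Obj) (frames : List (Nat × FrameLayout)) (u : State) (E SE CW SC SPb NN : Nat) : Prop where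
  e_lt : E < 16777216
  se_pos : 1 ≤ SE
  se_le : SE ≤ E
  ent : Codebook.entries u.mem (u.reg .rdi).toNat = (E : Int)
  se : Codebook.sorted_entries u.mem (u.reg .rdi).toNat = (SE : Int)
  sc : Codebook.sorted_codewords u.mem (u.reg .rdi).toNat = SC
  sparse : Codebook.sparse u.mem (u.reg .rdi).toNat = SPb
  nn_dense : SPb = 0 → NN = E
  nn_sparse : SPb ≠ 0 → NN = SE
  sc_where : 0x119d40 ≤ SC ∧ SC + 4 * (SE + 1) ≤ 0xC00000 ∧
    (SC + 4 * (SE + 1) ≤ (u.reg .rsp).toNat - 336 ∨ (u.reg .rsp).toNat + 8 ≤ SC)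
  sc_book : (u.reg .rdi).toNat + 2120 ≤ SC ∨ SC + 4 * (SE + 1) ≤ (u.reg .rdi).toNat
  sc_live : LiveBytes others frames SC (4 * (SE + 1))
  len_where : 0x119d40 ≤ (u.reg .rsi).toNat ∧ (u.reg .rsi).toNat + E ≤ 0xC00000 ∧
    ((u.reg .rsi).toNat + E ≤ (u.reg .rsp).toNat - 336 ∨ (u.reg .rsp).toNat + 8 ≤ (u.reg .rsi).toNat)
  len_sc : (u.reg .rsi).toNat + E ≤ SC ∨ SC + 4 * (SE + 1) ≤ (u.reg .rsi).toNat
  len_live : LiveBytes others frames (u.reg .rsi).toNat E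
  cw_where : 0x119d40 ≤ CW ∧ CW + 4 * NN ≤ 0xC00000 ∧
    (CW + 4 * NN ≤ (u.reg .rsp).toNat - 336 ∨ (u.reg .rsp).toNat + 8 ≤ CW)
  cw_live : LiveBytes others frames CW (4 * NN)
  cnt : SPb = 0 → longCount u.mem (u.reg .rsi).toNat E = SE

/-- The field `entries` as the walker's load. -/
theorem entries_eq (u : State) : Codebook.entries u.mem (u.reg .rdi).toNat = sint32 (u.mem.readLE (u.reg .rdi + 4) 4) := by
  simp only [vacc, voff]
  rw [Mem.i32_def]
  unfold Mem.u32
  rw [← readLE_field]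
  rfl

/-- The field `sorted_entries` as the walker's load. -/
theorem sorted_entries_eq (u : State) :
    Codebook.sorted_entries u.mem (u.reg .rdi).toNat = sint32 (u.mem.readLE (u.reg .rdi + 2112) 4) := by
  simp only [vacc, voff]
  rw [Mem.i32_def]
  unfold Mem.u32
  rw [← readLE_field]
  rfl

/-- The field `codewords` as the walker's load. -/
theorem codewords_eq (u : State) : Codebook.codewords u.mem (u.reg .rdi).toNat = u.mem.readLE (u.reg .rdi + 40) 8 := by
  simp only [vacc, voff]
  unfold Mem.u64
  rw [← readLE_field]
  rfl

/-- The field `sorted_codewords` as the walker's load. -/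
theorem sorted_codewords_eq (u : State) :
    Codebook.sorted_codewords u.mem (u.reg .rdi).toNat = u.mem.readLE (u.reg .rdi + 2096) 8 := by
  simp only [vacc, voff]
  unfold Mem.u64
  rw [← readLE_field]
  rfl

/-- The field `sparse` as the walker's load. -/
theorem sparse_eq (u : State) : Codebook.sparse u.mem (u.reg .rdi).toNat = u.mem.readLE (u.reg .rdi + 27) 1 := by
  simp only [vacc, voff]
  unfold Mem.u8
  rw [← readLE_field]
  rfl

/-- `Nums` from the precondition. -/
theorem nums_of_pre {others : List Obj} {frames : List (Nat × FrameLayout)} {Blk : Block → Prop} {u : State}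
    (hpre : SortedHuffmanPre others frames Blk u) (hroom : 7340032 + 336 ≤ (u.reg .rsp).toNat)
    {E SE CW SC SPb : Nat}
    (hE : u.mem.readLE (u.reg .rdi + 4) 4 = E) (hSE : u.mem.readLE (u.reg .rdi + 2112) 4 = SE)
    (hCW : u.mem.readLE (u.reg .rdi + 40) 8 = CW) (hSC : u.mem.readLE (u.reg .rdi + 2096) 8 = SC)
    (hSPb : u.mem.readLE (u.reg .rdi + 27) 1 = SPb) :
    ∃ NN, Nums others frames u E SE CW SC SPb NN := by
  have hsh := hpre.shadow
  have hsp := hsh.rsp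
  have hap := scApart_of_pre hpre
  have htop : 7340032 < (u.reg .rsp).toNat + 8 := by omega
  have a1 := entries_eq u
  have a2 := sorted_entries_eq u
  have a3 := codewords_eq u
  have a4 := sorted_codewords_eq u
  have a5 := sparse_eq u
  rw [hE] at a1
  rw [hSE] at a2
  rw [hCW] at a3
  rw [hSC] at a4
  rw [hSPb] at a5
  have hElt : E < 2 ^ 32 := by
    rw [← hE]
    exact Mem.readLE_lt' _ _ 4
  have hSElt : SE < 2 ^ 32 := by
    rw [← hSE]
    exact Mem.readLE_lt' _ _ 4
  have k1a := hpre.K1.ent_nonneg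
  have k1b := hpre.K1.ent_lt
  have k2a := hpre.se_pos
  have k2b := hpre.K2.se_le
  have c1 := sint32_cases E
  have c2 := sint32_cases SE
  have eE : Codebook.entries u.mem (u.reg .rdi).toNat = (E : Int) := by omega
  have eSE : Codebook.sorted_entries u.mem (u.reg .rdi).toNat = (SE : Int) := by omega
  have hE24 : E < 16777216 := by omega
  have hSE1 : 1 ≤ SE := by omega
  have hSEE : SE ≤ E := by omega
  have tE : (Codebook.entries u.mem (u.reg .rdi).toNat).toNat = E := by omega
  have tSE : (Codebook.sorted_entries u.mem (u.reg .rdi).toNat).toNat = SE := by omega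
  -- `sorted_codewords`
  have bsc := hpre.K4.sc k2a
  rw [a4, tSE] at bsc
  have wsc : L.textHi ≤ SC ∧ SC + 4 * (SE + 1) ≤ 12582912 ∧
      ((u.reg .rsp).toNat + 8 ≤ SC ∨ SC + 4 * (SE + 1) ≤ 7340032 ∨ 8388608 ≤ SC) :=
    blk_where hpre.live hsh.inv hsh.offText htop bsc (by simp only []; omega)
  have lsc : LiveBytes others frames SC (4 * (SE + 1)) := hpre.live _ bsc
  have dbook := hap.book
  simp only [Block.disjoint, scBlock, Vorbis.Off.sizeof.Codebook] at dbook
  rw [a4, tSE] at dbook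
  -- `lengths`
  have blen := hpre.lens
  rw [tE] at blen
  have wlen : L.textHi ≤ (u.reg .rsi).toNat ∧ (u.reg .rsi).toNat + E ≤ 12582912 ∧
      ((u.reg .rsp).toNat + 8 ≤ (u.reg .rsi).toNat ∨ (u.reg .rsi).toNat + E ≤ 7340032 ∨ 8388608 ≤ (u.reg .rsi).toNat) :=
    blk_where hpre.live hsh.inv hsh.offText htop blen (by simp only []; omega)
  have llen : LiveBytes others frames (u.reg .rsi).toNat E := hpre.live _ blen
  have dlen := hap.lens
  simp only [Block.disjoint, scBlock] at dlen
  rw [a4, tSE, tE] at dlen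
  have eT : L.textHi = 0x119d40 := rfl
  -- `codewords`
  by_cases hs : SPb = 0
  · have k := (hpre.K3t.dense (by rw [a5]; exact hs)).codewords
    rw [a3, tE] at k
    have wcw : L.textHi ≤ CW ∧ CW + 4 * E ≤ 12582912 ∧
        ((u.reg .rsp).toNat + 8 ≤ CW ∨ CW + 4 * E ≤ 7340032 ∨ 8388608 ≤ CW) :=
      blk_where hpre.live hsh.inv hsh.offText htop k (by simp only []; omega)
    have lcw : LiveBytes others frames CW (4 * E) := hpre.live _ k
    have hcnt := (hpre.dense (by rw [a5]; exact hs)).2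
    unfold CNT' at hcnt
    rw [tE, eSE] at hcnt
    refine ⟨E, hE24, hSE1, hSEE, eE, eSE, a4, a5, fun _ => rfl, fun h => absurd hs h, ⟨by omega, by omega, by omega⟩,
      by omega, lsc, ⟨by omega, by omega, by omega⟩, by omega, llen, ⟨by omega, by omega, by omega⟩, lcw, ?_⟩
    intro _
    omega
  · have hs1 : Codebook.sparse u.mem (u.reg .rdi).toNat = 1 := hpre.K2.sparse_one (by rw [a5]; exact hs)
    have k := hpre.K3t.sparse_codewords hs1
    rw [a3, tSE] at k
    have wcw : L.textHi ≤ CW ∧ CW + 4 * SE ≤ 12582912 ∧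
        ((u.reg .rsp).toNat + 8 ≤ CW ∨ CW + 4 * SE ≤ 7340032 ∨ 8388608 ≤ CW) :=
      blk_where hpre.live hsh.inv hsh.offText htop k (by simp only []; omega)
    have lcw : LiveBytes others frames CW (4 * SE) := hpre.live _ k
    refine ⟨SE, hE24, hSE1, hSEE, eE, eSE, a4, a5, fun h => absurd h hs, fun _ => rfl, ⟨by omega, by omega, by omega⟩,
      by omega, lsc, ⟨by omega, by omega, by omega⟩, by omega, llen, ⟨by omega, by omega, by omega⟩, lcw, ?_⟩
    intro h
    exact absurd h hs

/-- A field of `*c` reads in the current memory as at the entry: the stores went into the own stack frame and into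
`sorted_codewords`, both apart from the struct. -/
theorem read_book {u : State} {m : Mem} {SC n : Nat}
    (hsame : Mem.SameExcept [⟨(u.reg .rsp).toNat - 336, (u.reg .rsp).toNat⟩, ⟨SC, SC + n⟩] u.mem m)
    (hb1 : (u.reg .rdi).toNat + 2120 ≤ 12582912)
    (hb2 : (u.reg .rdi).toNat + 2120 ≤ (u.reg .rsp).toNat - 336 ∨ (u.reg .rsp).toNat ≤ (u.reg .rdi).toNat)
    (hb3 : (u.reg .rdi).toNat + 2120 ≤ SC ∨ SC + n ≤ (u.reg .rdi).toNat)
    (k : Word) (len : Nat) (hk : k.toNat + len ≤ 2120) :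
    m.readLE (u.reg .rdi + k) len = u.mem.readLE (u.reg .rdi + k) len := by
  have e : (u.reg .rdi + k).toNat = (u.reg .rdi).toNat + k.toNat := by
    rw [UInt64.toNat_add]
    have : (u.reg .rdi).toNat + k.toNat < 2 ^ 64 := by omega
    exact Nat.mod_eq_of_lt this
  refine hsame.readLE _ _ (by omega) ?_
  intro w hw
  rcases List.mem_cons.mp hw with rfl | hw'
  · simp only []
    omega
  · have e2 := List.mem_singleton.mp hw'
    subst e2
    simp only []
    omega

/-- A small counter in a 32-bit register, read as a signed `int`. -/
theorem part32_ofNat (i : Nat) (hi : i < 2 ^ 31) : (Word.part .w32 (UInt64.ofNat i)).toInt = (i : Int) := by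
  rw [part32_toInt]
  have e : (UInt64.ofNat i).toNat = i := by
    rw [UInt64.toNat_ofNat']
    omega
  rw [e]
  have := sint32_cases (i % 2 ^ 32)
  omega

/-- A small bound loaded from memory, read as a signed `int`. -/
theorem bv32_toInt (n : Nat) (h : n < 2 ^ 31) : (BitVec.ofNat 32 n).toInt = (n : Int) := by
  rw [toInt_ofNat32 n (by omega)]
  have := sint32_cases n
  omega

/-- `movsxd r, r32 ; shl r, 2 ; add r, [ptr]` for a small counter: the address of word `i` of the array at `p`. -/
theorem idx4 (i p : Nat) (hi : i < 2 ^ 31) (hp : p + 4 * i < 2 ^ 64) :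
    (Word.ofBV (BitVec.signExtend 64 (Word.part .w32 (UInt64.ofNat i))) <<< 2 + UInt64.ofNat p).toNat = p + 4 * i := by
  have e : (UInt64.ofNat i).toNat = i := by
    rw [UInt64.toNat_ofNat']
    omega
  have e2 : (UInt64.ofNat i).toNat % 2 ^ 32 = i := by
    rw [e]
    omega
  have := sext32_shl2_add (UInt64.ofNat i) p (by omega) (by omega)
  rw [e2] at this
  exact this

/-- `add r32, 1` on a small counter. -/
theorem counter_inc32 (i : Nat) (hi : i < 2 ^ 31) :
    Word.ofBV (Word.part .w32 (UInt64.ofNat i) + 1#32) = UInt64.ofNat (i + 1) := by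
  apply UInt64.toNat_inj.mp
  rw [toNat_ofBV32, BitVec.toNat_add, Asan.part32_toNat, UInt64.toNat_ofNat', UInt64.toNat_ofNat']
  simp only [BitVec.toNat_ofNat]
  omega

/-- `movsxd rbx, r32 ; lea r, [p + rbx]` for a small counter: the address of byte `i` of the array at `p`. -/
theorem idx1 (i : Nat) (p : Word) (hi : i < 2 ^ 31) (hp : p.toNat + i < 2 ^ 64) :
    (p + Word.ofBV (BitVec.signExtend 64 (Word.part .w32 (UInt64.ofNat i)))).toNat = p.toNat + i := by
  have e : (UInt64.ofNat i).toNat = i := by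
    rw [UInt64.toNat_ofNat']
    omega
  have e2 : (UInt64.ofNat i).toNat % 2 ^ 32 = i := by
    rw [e]
    omega
  have := sext32_add (UInt64.ofNat i) p (by omega) (by omega)
  rw [e2] at this
  rw [UInt64.add_comm]
  exact this

/-- A byte of the `lengths` array reads in the current memory as at the entry. -/
theorem read_len {u : State} {m : Mem} {SC n E : Nat}
    (hsame : Mem.SameExcept [⟨(u.reg .rsp).toNat - 336, (u.reg .rsp).toNat⟩, ⟨SC, SC + n⟩] u.mem m)
    (hl1 : (u.reg .rsi).toNat + E ≤ 12582912)
    (hl2 : (u.reg .rsi).toNat + E ≤ (u.reg .rsp).toNat - 336 ∨ (u.reg .rsp).toNat ≤ (u.reg .rsi).toNat)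
    (hl3 : (u.reg .rsi).toNat + E ≤ SC ∨ SC + n ≤ (u.reg .rsi).toNat)
    (a : Word) (i : Nat) (ha : a.toNat = (u.reg .rsi).toNat + i) (hi : i < E) :
    m.readLE a 1 = u.mem.u8 ((u.reg .rsi).toNat + i) := by
  have e : a = addr ((u.reg .rsi).toNat + i) := eq_addr _ _ ha
  unfold Mem.u8
  rw [← e]
  refine hsame.readLE _ _ (by omega) ?_
  intro w hw
  rcases List.mem_cons.mp hw with rfl | hw'
  · simp only []
    omega
  · have e2 := List.mem_singleton.mp hw'
    subst e2
    simp only []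
    omega

/-- The low byte of `movzx esi, byte [m]`. -/
theorem byte_arg (B : Nat) (h : B < 256) : (Word.ofBV (BitVec.zeroExtend 32 (BitVec.ofNat 8 B))).toNat % 256 = B := by
  rw [toNat_ofBV32]
  simp only [BitVec.truncate_eq_setWidth, BitVec.toNat_setWidth, BitVec.toNat_ofNat]
  omega

/-- `include_in_sort` of a dense book on an included length byte. -/
theorem include_yes (B : Nat) (h : B ≠ 255 ∧ 10 < B) : includeInSort 0 B = 1 := by
  unfold includeInSort
  rw [if_neg (by decide), if_pos h]

/-- `include_in_sort` of a dense book on a length byte that is not included. -/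
theorem include_no (B : Nat) (h : ¬ (B ≠ 255 ∧ 10 < B)) : includeInSort 0 B = 0 := by
  unfold includeInSort
  rw [if_neg (by decide), if_neg h]

/-- `test eax, eax` after include_in_sort of a dense book: not zero means the length byte is included. -/
theorem include_of_ne (B : Nat) (h : ¬ (Word.part .w32 (includeInSort 0 B)).toNat = 0) : B ≠ 255 ∧ 10 < B := by
  by_cases hinc : B ≠ 255 ∧ 10 < B
  · exact hinc
  · exfalso
    apply h
    rw [include_no B hinc, Asan.part32_toNat]
    decide

/-- `test eax, eax` after include_in_sort of a dense book: zero means the length byte is not included. -/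
theorem not_include_of_eq (B : Nat) (h : (Word.part .w32 (includeInSort 0 B)).toNat = 0) : ¬ (B ≠ 255 ∧ 10 < B) := by
  intro hinc
  rw [include_yes B hinc, Asan.part32_toNat] at h
  exact absurd h (by decide)

/-- `lea r32, [r + 1]` on a small counter. -/
theorem lea32_inc (k : Nat) (hk : k < 2 ^ 31) :
    Word.ofBV (BitVec.setWidth 32 (UInt64.ofNat k + 1).toBitVec) = UInt64.ofNat (k + 1) := by
  apply UInt64.toNat_inj.mp
  have e1 : (1 : UInt64).toNat = 1 := rfl
  rw [toNat_ofBV32, BitVec.toNat_setWidth, UInt64.toNat_toBitVec, UInt64.toNat_add, UInt64.toNat_ofNat',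
    UInt64.toNat_ofNat', e1]
  omega

/-- **The check of a field of `*c`** (`lea rdi, [rbp + k] ; call __asan_loadN_noabort`): the `n` bytes at offset `k` lie inside
the live struct, and no store so far went to the shadow. -/
theorem book_check {others : List Obj} {frames : List (Nat × FrameLayout)} {Blk : Block → Prop} {u : State} {m : Mem}
    (hpre : SortedHuffmanPre others frames Blk u) (hun : ShadowUntouched u.mem m) (k : Word) (n : Nat) (hn : 1 ≤ n)
    (hk : k.toNat + n ≤ 2120) : AccSmall n m (u.reg .rdi + k) := by
  have hbook := hpre.bookLive.where_ hpre.shadow.inv hpre.shadow.offText (by decide)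
  simp only [Vorbis.Off.sizeof.Codebook] at hbook
  have e : (u.reg .rdi + k).toNat = (u.reg .rdi).toNat + k.toNat := by
    rw [UInt64.toNat_add]
    have : (u.reg .rdi).toNat + k.toNat < 2 ^ 64 := by omega
    exact Nat.mod_eq_of_lt this
  refine hpre.bookLive.accSmall hpre.shadow.inv hun _ n hn ?_ ?_
  · rw [e]
    omega
  · rw [e]
    simp only [Vorbis.Off.sizeof.Codebook]
    omega

end Vorbis.Spec.compute_sorted_huffman_1
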